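-- pv_equiv track=rewrite | github.com/Dronnn/crammingBot | bot/utils/formatting.py | format_declension
-- ===== SOURCE A (Python) =====
-- _DECLENSION_DISPLAY_ORDER = ("nominativ", "akkusativ", "dativ", "genitiv")
--
-- _VERB_GOVERNANCE_KEYS = ("government", "governance", "regierung", "rektion", "управление")
--
-- def format_declension(declension: dict[str, str] | None) -> str:
--     if not declension:
--         return ""
--     values: list[tuple[str, str]] = []
--     normalized = {str(key).strip().lower(): str(value).strip() for key, value in declension.items()}
--     normalized = {
--         key: value
--         for key, value in normalized.items()
--         if key not in _VERB_GOVERNANCE_KEYS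
--     }
--     if not normalized:
--         return ""
--     for key in _DECLENSION_DISPLAY_ORDER:
--         value = normalized.get(key, "")
--         if value:
--             values.append((key, value))
--     for key, value in normalized.items():
--         if key in _DECLENSION_DISPLAY_ORDER or not value:
--             continue
--         values.append((key, value))
--     return ", ".join(f"{key}: {value}" for key, value in values)
-- ===== SOURCE B (Python) =====
-- _DECLENSION_DISPLAY_ORDER = ("nominativ", "akkusativ", "dativ", "genitiv")
--
-- _VERB_GOVERNANCE_KEYS = ("government", "governance", "regierung", "rektion", "управление")
--
-- def format_declension(declension):
--     if not declension:
--         return ""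
--     rank = {key: i for i, key in enumerate(_DECLENSION_DISPLAY_ORDER)}
--     sentinel = len(_DECLENSION_DISPLAY_ORDER)
--     normalized = {str(key).strip().lower(): str(value).strip() for key, value in declension.items()}
--     buckets = [[] for _ in range(sentinel + 1)]
--     for key, value in normalized.items():
--         if value and key not in _VERB_GOVERNANCE_KEYS:
--             buckets[rank.get(key, sentinel)].append(f"{key}: {value}")
--     return ", ".join(part for bucket in buckets for part in bucket)
-- ===== Notes on version B (the rewrite author's own statement) =====
-- stated objective: alternative
-- what changed: A's display-key lookup loop over the four case names plus a second pass filtering the remaining items is replaced by one distribution pass that drops empty/governance entries and appends each formatted item into a bucket indexed by its display rank (sentinel bucket for non-display keys), then joins the concatenated buckets.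
import Mathlib
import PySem

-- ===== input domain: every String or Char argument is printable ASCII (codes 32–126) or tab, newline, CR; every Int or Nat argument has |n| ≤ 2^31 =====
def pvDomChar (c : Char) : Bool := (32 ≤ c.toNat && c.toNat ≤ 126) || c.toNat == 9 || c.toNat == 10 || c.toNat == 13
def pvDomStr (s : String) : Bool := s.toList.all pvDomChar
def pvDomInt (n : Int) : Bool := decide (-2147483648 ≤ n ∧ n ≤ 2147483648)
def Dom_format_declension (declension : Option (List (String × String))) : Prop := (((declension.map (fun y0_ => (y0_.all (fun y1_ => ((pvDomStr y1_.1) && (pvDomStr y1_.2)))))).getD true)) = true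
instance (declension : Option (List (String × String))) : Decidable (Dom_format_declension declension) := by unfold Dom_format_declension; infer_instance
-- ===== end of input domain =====

-- B replaces A's display-key lookup loop + second filter loop by ONE distribution pass into rank buckets (objective: alternative).

-- ===== PORT A =====
-- shared module constants and the shared normalization/formatting code (identical lines in Source A and Source B)
def pvOrder : List String := ["nominativ", "akkusativ", "dativ", "genitiv"]
def pvGov : List String := ["government", "governance", "regierung", "rektion", "управление"]
-- (str(key).strip().lower(), str(value).strip()) — str() is the identity on str
def pvNormPair (p : String × String) : String × String :=
  (PySem.Str.lower (PySem.Str.strip p.1), PySem.Str.strip p.2)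
-- f"{key}: {value}"
def pvFmt (p : String × String) : String := p.1 ++ ": " ++ p.2

def format_declension (declension : Option (List (String × String))) : String :=
  match declension with
  | none => ""                                  -- `if not declension` (None)
  | some l =>
    if l = [] then ""                           -- `if not declension` (empty dict)
    else
      -- normalized = {str(k).strip().lower(): str(v).strip() for k, v in declension.items()}
      let normalized := PySem.Dict.ofList ((PySem.Dict.ofList l).items.map pvNormPair)
      -- normalized = {k: v for k, v in normalized.items() if k not in _VERB_GOVERNANCE_KEYS}
      let normalized2 := PySem.Dict.ofList (normalized.items.filter (fun p => !(pvGov.contains p.1)))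
      if normalized2.items = [] then ""         -- `if not normalized`
      else
        -- for key in _DECLENSION_DISPLAY_ORDER: value = normalized.get(key, ""); if value: values.append((key, value))
        let values := pvOrder.foldl (fun acc key =>
          let value := normalized2.getD key ""
          if value ≠ "" then acc ++ [(key, value)] else acc) ([] : List (String × String))
        -- for key, value in normalized.items(): if key in _DECLENSION_DISPLAY_ORDER or not value: continue; values.append((key, value))
        let values := normalized2.items.foldl (fun acc p =>
          if pvOrder.contains p.1 || p.2 == "" then acc else acc ++ [p]) values
        PySem.Str.join ", " (values.map pvFmt)

-- ===== PORT B =====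
-- rank = {key: i for i, key in enumerate(_DECLENSION_DISPLAY_ORDER)}
def pvRank : PySem.Dict String Int :=
  PySem.Dict.ofList ((PySem.List.enumerate pvOrder).map (fun p => (p.2, p.1)))
-- rank.get(key, sentinel) used as a list index; the rank values are 0..3 and the sentinel is 4, so toNat is exact
def pvIdx (k : String) : Nat := (pvRank.getD k 4).toNat

def format_declension_alt (declension : Option (List (String × String))) : String :=
  match declension with
  | none => ""
  | some l =>
    if l = [] then ""
    else
      let normalized := PySem.Dict.ofList ((PySem.Dict.ofList l).items.map pvNormPair)
      -- buckets = [[] for _ in range(sentinel + 1)]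
      let buckets : List (List String) := List.replicate 5 []
      -- for key, value in normalized.items(): if value and key not in _VERB_GOVERNANCE_KEYS: buckets[rank.get(key, sentinel)].append(f"{key}: {value}")
      let buckets := normalized.items.foldl (fun bs p =>
        if p.2 ≠ "" ∧ ¬ (pvGov.contains p.1 = true) then
          bs.set (pvIdx p.1) (bs.getD (pvIdx p.1) [] ++ [pvFmt p])
        else bs) buckets
      -- ", ".join(part for bucket in buckets for part in bucket)
      PySem.Str.join ", " buckets.flatten

-- ===== PRECONDITION & SPEC =====
def Spec_format_declension (declension : Option (List (String × String))) (out : String) : Prop := out = format_declension_alt declension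
instance (declension : Option (List (String × String))) (out : String) : Decidable (Spec_format_declension declension out) := by unfold Spec_format_declension; infer_instance

-- ===== CLAIM (what is proved, stated in full; the proofs are below) =====
def Claim_equal_format_declension : Prop := ∀ (declension : Option (List (String × String))), Dom_format_declension declension → Spec_format_declension declension (format_declension declension)

-- ===== LEMMAS AND PROOFS =====

-- bucket i after B's loop: the items whose rank is i, kept truthy and non-governance, formatted
def pvG (i : Nat) (ps : List (String × String)) : List String :=
  (ps.filter (fun p => decide (p.2 ≠ "" ∧ ¬ (pvGov.contains p.1 = true)) && (pvIdx p.1 == i))).map pvFmt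

lemma pvIdx_eq (k : String) :
    pvIdx k = if k = "nominativ" then 0 else if k = "akkusativ" then 1
      else if k = "dativ" then 2 else if k = "genitiv" then 3 else 4 := by
  by_cases h1 : k = "nominativ"
  · subst h1; decide
  by_cases h2 : k = "akkusativ"
  · subst h2; decide
  by_cases h3 : k = "dativ"
  · subst h3; decide
  by_cases h4 : k = "genitiv"
  · subst h4; decide
  rw [if_neg h1, if_neg h2, if_neg h3, if_neg h4]
  have h : pvRank = PySem.Dict.mk [("nominativ",0),("akkusativ",1),("dativ",2),("genitiv",3)] := by decide
  have e1 : (("nominativ" : String) == k) = false := beq_eq_false_iff_ne.mpr (Ne.symm h1)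
  have e2 : (("akkusativ" : String) == k) = false := beq_eq_false_iff_ne.mpr (Ne.symm h2)
  have e3 : (("dativ" : String) == k) = false := beq_eq_false_iff_ne.mpr (Ne.symm h3)
  have e4 : (("genitiv" : String) == k) = false := beq_eq_false_iff_ne.mpr (Ne.symm h4)
  rw [pvIdx, h]
  simp [PySem.Dict.getD, PySem.Dict.get?, List.find?, e1, e2, e3, e4]

lemma pvG_cons (p : String × String) (ps : List (String × String)) (i : Nat) :
    pvG i (p :: ps)
      = (if (p.2 ≠ "" ∧ ¬ (pvGov.contains p.1 = true)) ∧ pvIdx p.1 = i then [pvFmt p] else []) ++ pvG i ps := by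
  by_cases h1 : p.2 ≠ "" ∧ ¬ (pvGov.contains p.1 = true)
  · obtain ⟨hv, hg⟩ := h1
    have hm : p.1 ∉ pvGov := by simpa using hg
    by_cases h2 : pvIdx p.1 = i
    · simp [pvG, hv, hm, h2]
    · simp [pvG, hv, hm, h2]
  · have h1' : ¬(¬p.2 = "" ∧ p.1 ∉ pvGov) := by simpa using h1
    simp [pvG, h1']

lemma pvIdx_nom : pvIdx "nominativ" = 0 := by decide
lemma pvIdx_akk : pvIdx "akkusativ" = 1 := by decide
lemma pvIdx_dat : pvIdx "dativ" = 2 := by decide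
lemma pvIdx_gen : pvIdx "genitiv" = 3 := by decide
lemma pvGov_nom : ("nominativ" : String) ∉ pvGov := by decide
lemma pvGov_akk : ("akkusativ" : String) ∉ pvGov := by decide
lemma pvGov_dat : ("dativ" : String) ∉ pvGov := by decide
lemma pvGov_gen : ("genitiv" : String) ∉ pvGov := by decide

lemma pvBuckets (ps : List (String × String)) (b0 b1 b2 b3 b4 : List String) :
    ps.foldl (fun bs p =>
        if p.2 ≠ "" ∧ ¬ (pvGov.contains p.1 = true) then
          bs.set (pvIdx p.1) (bs.getD (pvIdx p.1) [] ++ [pvFmt p])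
        else bs) [b0, b1, b2, b3, b4]
      = [b0 ++ pvG 0 ps, b1 ++ pvG 1 ps, b2 ++ pvG 2 ps, b3 ++ pvG 3 ps, b4 ++ pvG 4 ps] := by
  induction ps generalizing b0 b1 b2 b3 b4 with
  | nil => simp [pvG]
  | cons p t ih =>
    rw [List.foldl_cons]
    by_cases hc : p.2 ≠ "" ∧ ¬ (pvGov.contains p.1 = true)
    · rw [if_pos hc]
      obtain ⟨hv, hg⟩ := hc
      have hm : p.1 ∉ pvGov := by simpa using hg
      have hidx := pvIdx_eq p.1
      by_cases k1 : p.1 = "nominativ"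
      · rw [if_pos k1] at hidx
        rw [hidx, show ([b0,b1,b2,b3,b4].set 0 (([b0,b1,b2,b3,b4].getD 0 []) ++ [pvFmt p])) = [b0 ++ [pvFmt p],b1,b2,b3,b4] from rfl, ih]
        simp [pvG_cons, hv, k1, pvIdx_nom, pvGov_nom, List.append_assoc]
      · rw [if_neg k1] at hidx
        by_cases k2 : p.1 = "akkusativ"
        · rw [if_pos k2] at hidx
          rw [hidx, show ([b0,b1,b2,b3,b4].set 1 (([b0,b1,b2,b3,b4].getD 1 []) ++ [pvFmt p])) = [b0,b1 ++ [pvFmt p],b2,b3,b4] from rfl, ih]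
          simp [pvG_cons, hv, k2, pvIdx_akk, pvGov_akk, List.append_assoc]
        · rw [if_neg k2] at hidx
          by_cases k3 : p.1 = "dativ"
          · rw [if_pos k3] at hidx
            rw [hidx, show ([b0,b1,b2,b3,b4].set 2 (([b0,b1,b2,b3,b4].getD 2 []) ++ [pvFmt p])) = [b0,b1,b2 ++ [pvFmt p],b3,b4] from rfl, ih]
            simp [pvG_cons, hv, k3, pvIdx_dat, pvGov_dat, List.append_assoc]
          · rw [if_neg k3] at hidx
            by_cases k4 : p.1 = "genitiv"
            · rw [if_pos k4] at hidx
              rw [hidx, show ([b0,b1,b2,b3,b4].set 3 (([b0,b1,b2,b3,b4].getD 3 []) ++ [pvFmt p])) = [b0,b1,b2,b3 ++ [pvFmt p],b4] from rfl, ih]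
              simp [pvG_cons, hv, k4, pvIdx_gen, pvGov_gen, List.append_assoc]
            · rw [if_neg k4] at hidx
              rw [hidx, show ([b0,b1,b2,b3,b4].set 4 (([b0,b1,b2,b3,b4].getD 4 []) ++ [pvFmt p])) = [b0,b1,b2,b3,b4 ++ [pvFmt p]] from rfl, ih]
              simp [pvG_cons, hv, hm, hidx, List.append_assoc]
    · rw [if_neg hc, ih]
      have h1' : p.2 = "" ∨ p.1 ∈ pvGov := by
        by_cases hv : p.2 = ""
        · exact Or.inl hv
        · right; by_contra hm; exact hc ⟨hv, by simpa using hm⟩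
      rcases h1' with h | h <;> simp [pvG_cons, h]

-- the second loop of A: skipped-or-appended elements are a filter
lemma pvFoldlSkip {α : Type} (q : α → Bool) (l : List α) (acc : List α) :
    l.foldl (fun acc x => if q x then acc else acc ++ [x]) acc = acc ++ l.filter (fun x => !q x) := by
  induction l generalizing acc with
  | nil => simp
  | cons x t ih => by_cases h : q x = true <;> simp [h, ih]

-- the first loop of A, over any key list
lemma pvFoldlDisp (D : PySem.Dict String String) (ks : List String) (acc : List (String × String)) :
    ks.foldl (fun acc key =>
        if D.getD key "" ≠ "" then acc ++ [(key, D.getD key "")] else acc) acc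
      = acc ++ ks.flatMap (fun k => if D.getD k "" ≠ "" then [(k, D.getD k "")] else []) := by
  induction ks generalizing acc with
  | nil => simp
  | cons k t ih =>
    rw [List.foldl_cons]
    by_cases h : D.getD k "" ≠ ""
    · rw [if_pos h, ih, List.flatMap_cons, if_pos h]; simp
    · rw [if_neg h, ih, List.flatMap_cons, if_neg h]; simp

lemma pvItemsOfList {ps : List (String × String)} (h : (ps.map Prod.fst).Nodup) :
    (PySem.Dict.ofList ps).items = ps := by
  have := PySem.Dict.items_foldl_insert_fresh ps Prod.fst Prod.snd PySem.Dict.empty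
    (by intro a _; simp) h
  simpa [PySem.Dict.ofList, PySem.Dict.update] using this

-- with nodup keys, the sublist with key k is determined by the dict lookup
lemma pvFilterKey (ps : List (String × String)) (h : (ps.map Prod.fst).Nodup) (k : String) :
    ps.filter (fun p => decide (p.1 = k) && decide (p.2 ≠ ""))
      = (if (PySem.Dict.mk ps).getD k "" ≠ "" then [(k, (PySem.Dict.mk ps).getD k "")] else []) := by
  induction ps with
  | nil => simp [PySem.Dict.getD, PySem.Dict.get?]
  | cons q t ih =>
    obtain ⟨q1, q2⟩ := q
    rw [List.map_cons, List.nodup_cons] at h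
    by_cases hk : q1 = k
    · subst hk
      have hg : (PySem.Dict.mk ((q1, q2) :: t)).getD q1 "" = q2 := by
        simp [PySem.Dict.getD, PySem.Dict.get?_mk_cons]
      have ht : t.filter (fun p => decide (p.1 = q1) && decide (p.2 ≠ "")) = [] := by
        apply List.filter_eq_nil_iff.mpr
        intro p hp
        simp only [Bool.and_eq_true, decide_eq_true_eq, not_and]
        intro e _
        have hm := List.mem_map_of_mem (f := Prod.fst) hp
        rw [e] at hm
        exact h.1 hm
      rw [hg]
      by_cases hv : q2 = ""
      · rw [List.filter_cons_of_neg (by simp [hv]), ht, if_neg (by simp [hv])]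
      · rw [List.filter_cons_of_pos (by simp [hv]), ht, if_pos hv]
    · have hg : (PySem.Dict.mk ((q1, q2) :: t)).getD k "" = (PySem.Dict.mk t).getD k "" := by
        simp [PySem.Dict.getD, PySem.Dict.get?_mk_cons, beq_eq_false_iff_ne.mpr hk]
      rw [List.filter_cons_of_neg (by simp [hk]), ih h.2, hg]


lemma pvIdx_iff_nom (s : String) : pvIdx s = 0 ↔ s = "nominativ" := by
  rw [pvIdx_eq s]; split_ifs <;> simp_all

lemma pvIdx_iff_akk (s : String) : pvIdx s = 1 ↔ s = "akkusativ" := by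
  rw [pvIdx_eq s]; split_ifs <;> simp_all

lemma pvIdx_iff_dat (s : String) : pvIdx s = 2 ↔ s = "dativ" := by
  rw [pvIdx_eq s]; split_ifs <;> simp_all

lemma pvIdx_iff_gen (s : String) : pvIdx s = 3 ↔ s = "genitiv" := by
  rw [pvIdx_eq s]; split_ifs <;> simp_all

lemma pvIdx_iff_ord (s : String) : pvIdx s = 4 ↔ s ∉ pvOrder := by
  rw [pvIdx_eq s]; split_ifs <;> simp_all [pvOrder]

-- bucket i (i < 4) holds exactly A's display entry for the i-th display key
lemma pvG_key (M : List (String × String))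
    (hndN : ((M.filter (fun p => !(pvGov.contains p.1))).map Prod.fst).Nodup)
    (k : String) (i : Nat) (hk : ∀ s : String, pvIdx s = i ↔ s = k) (hg : k ∉ pvGov) :
    pvG i M = (if (PySem.Dict.mk (M.filter (fun p => !(pvGov.contains p.1)))).getD k "" ≠ "" then
        [pvFmt (k, (PySem.Dict.mk (M.filter (fun p => !(pvGov.contains p.1)))).getD k "")] else []) := by
  have hfe : M.filter (fun p => decide (p.2 ≠ "" ∧ ¬ (pvGov.contains p.1 = true)) && (pvIdx p.1 == i))
      = (M.filter (fun p => !(pvGov.contains p.1))).filter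
          (fun p => decide (p.1 = k) && decide (p.2 ≠ "")) := by
    rw [List.filter_filter]
    apply List.filter_congr
    intro p _
    by_cases h1 : p.1 = k
    · have hgc : pvGov.contains p.1 = false := by simp [h1]; simpa using hg
      have hik : pvIdx p.1 = i := (hk p.1).mpr h1
      by_cases h2 : p.2 = "" <;> simp [h1, h2, hk]
    · have hni : ¬ pvIdx p.1 = i := fun hc => h1 ((hk p.1).mp hc)
      simp [h1, hni]
  rw [pvG, hfe, pvFilterKey _ hndN k]
  split_ifs with h <;> simp

-- bucket 4 holds exactly A's second (non-display) loop output
lemma pvG_rest (M : List (String × String)) :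
    pvG 4 M = ((M.filter (fun p => !(pvGov.contains p.1))).filter
        (fun p => !(pvOrder.contains p.1 || p.2 == ""))).map pvFmt := by
  rw [pvG, List.filter_filter]
  congr 1
  apply List.filter_congr
  intro p _
  by_cases h1 : p.1 ∈ pvOrder
  · have : ¬ pvIdx p.1 = 4 := by simp [pvIdx_iff_ord, h1]
    simp [h1, this]
  · have : pvIdx p.1 = 4 := (pvIdx_iff_ord p.1).mpr h1
    by_cases h2 : p.2 = "" <;> by_cases h3 : p.1 ∈ pvGov <;> simp [h1, h2, h3, this]

-- ===== VERDICT (by name: the statement is the Claim_ definition above) =====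
theorem format_declension_spec : Claim_equal_format_declension := by
  intro d _
  unfold Spec_format_declension
  cases d with
  | none => rfl
  | some l =>
    by_cases hl : l = []
    · simp [format_declension, format_declension_alt, hl]
    · simp only [format_declension, format_declension_alt, if_neg hl]
      set Mi : List (String × String) :=
        (PySem.Dict.ofList ((PySem.Dict.ofList l).items.map pvNormPair)).items with hMi
      set N : List (String × String) := Mi.filter (fun p => !(pvGov.contains p.1)) with hN
      have hndMi : (Mi.map Prod.fst).Nodup := by
        simpa [PySem.Dict.keys] using
          PySem.Dict.nodup_keys_ofList (ps := (PySem.Dict.ofList l).items.map pvNormPair)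
      have hndN : (N.map Prod.fst).Nodup :=
        (List.filter_sublist.map Prod.fst).nodup hndMi
      have hdict : PySem.Dict.ofList N = PySem.Dict.mk N := by
        conv_rhs => rw [← pvItemsOfList hndN]
      rw [hdict]
      rw [show (List.replicate 5 ([] : List String)) = [[],[],[],[],[]] from rfl, pvBuckets]
      by_cases hNe : N = []
      · rw [if_pos (by simpa using hNe)]
        have hall := List.filter_eq_nil_iff.mp (hN ▸ hNe)
        have hg : ∀ i, pvG i Mi = [] := by
          intro i
          rw [pvG, List.filter_eq_nil_iff.mpr]
          · rfl
          · intro p hp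
            simp only [Bool.and_eq_true, decide_eq_true_eq, not_and]
            intro h
            exact absurd (by simpa using hall p hp) h.2
        simp [hg]
        decide
      · rw [if_neg (by simpa using hNe)]
        rw [pvFoldlDisp, pvFoldlSkip]
        rw [pvG_key Mi hndN "nominativ" 0 pvIdx_iff_nom (by decide),
            pvG_key Mi hndN "akkusativ" 1 pvIdx_iff_akk (by decide),
            pvG_key Mi hndN "dativ" 2 pvIdx_iff_dat (by decide),
            pvG_key Mi hndN "genitiv" 3 pvIdx_iff_gen (by decide),
            pvG_rest Mi]
        rw [← hN]
        congr 1
        simp [pvOrder, apply_ite (List.map pvFmt), List.append_assoc]
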